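-- pv_equiv track=rewrite | github.com/Ag3497120/verantyx-v6 | arc/world_commands.py | panel_diff_v
-- ===== SOURCE A (Python) =====
-- from collections import Counter, defaultdict
--
-- def _bg(g):
--     c = Counter()
--     for row in g: c.update(row)
--     return c.most_common(1)[0][0]
--
-- def _find_sep_cols(g, bg):
--     h,w=len(g),len(g[0])
--     sep=[]
--     for c in range(w):
--         col_colors=set(g[r][c] for r in range(h))
--         if len(col_colors)==1 and g[0][c]!=bg:
--             sep.append((c,g[0][c]))
--     return sep
--
-- def _extract_panels_v(g):
--     bg=_bg(g); h,w=len(g),len(g[0])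
--     seps=_find_sep_cols(g,bg)
--     if not seps: return [g]
--     bounds=[-1]+[c for c,_ in seps]+[w]
--     panels=[]
--     for i in range(len(bounds)-1):
--         cs,ce=bounds[i]+1,bounds[i+1]
--         if cs<ce: panels.append([[g[r][c] for c in range(cs,ce)] for r in range(h)])
--     return panels
--
-- def panel_diff_v(g):
--     bg=_bg(g); panels=_extract_panels_v(g)
--     if len(panels)!=2: return g
--     p1,p2=panels[0],panels[1]
--     h=min(len(p1),len(p2)); w=min(len(p1[0]),len(p2[0]))
--     res=[[bg]*w for _ in range(h)]
--     for r in range(h):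
--         for c in range(w):
--             if p1[r][c]!=bg and p2[r][c]==bg: res[r][c]=p1[r][c]
--             elif p2[r][c]!=bg and p1[r][c]==bg: res[r][c]=p2[r][c]
--     return res
-- ===== SOURCE B (Python) =====
-- from collections import Counter
--
-- def _bg(g):
--     c = Counter()
--     for row in g: c.update(row)
--     return c.most_common(1)[0][0]
--
-- def panel_diff_v(g):
--     # Single left-to-right column walk, panels kept column-major; same _bg helper.
--     bg = _bg(g)
--     h, w = len(g), len(g[0])
--     panels, cur = [], []
--     for c in range(w):
--         col = [g[r][c] for r in range(h)]
--         if all(x == col[0] for x in col) and col[0] != bg: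
--             if cur:
--                 panels.append(cur)
--                 cur = []
--         else:
--             cur.append(col)
--     if cur:
--         panels.append(cur)
--     if len(panels) != 2:
--         return g
--     p, q = panels
--     ww = min(len(p), len(q))
--     return [[p[c][r] if p[c][r] != bg and q[c][r] == bg
--              else q[c][r] if q[c][r] != bg and p[c][r] == bg
--              else bg
--              for c in range(ww)]
--             for r in range(h)]
-- ===== Notes on version B (the rewrite author's own statement) =====
-- stated objective: alternative
-- what changed: A's four-stage pipeline (scan for separator columns, build a bounds list, slice row-major panels between consecutive bounds, then fill a mutable result matrix) is replaced by a single left-to-right column walk that accumulates column-major panels directly, splitting at uniform non-background columns, and renders the diff as one nested comprehension over the two column lists.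
import Mathlib
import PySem

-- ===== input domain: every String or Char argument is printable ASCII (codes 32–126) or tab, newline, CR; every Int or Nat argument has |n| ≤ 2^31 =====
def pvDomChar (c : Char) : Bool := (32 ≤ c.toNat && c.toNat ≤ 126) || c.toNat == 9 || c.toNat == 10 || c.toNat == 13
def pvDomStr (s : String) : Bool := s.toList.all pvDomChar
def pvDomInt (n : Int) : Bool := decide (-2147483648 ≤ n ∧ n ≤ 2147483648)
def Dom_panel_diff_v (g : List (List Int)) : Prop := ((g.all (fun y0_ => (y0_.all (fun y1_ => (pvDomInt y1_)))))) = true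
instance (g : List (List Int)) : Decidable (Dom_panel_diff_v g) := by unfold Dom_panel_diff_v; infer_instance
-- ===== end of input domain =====

-- B replaces A's separator-scan/bounds/slice pipeline by one left-to-right column walk that
-- accumulates column-major panels directly (objective: alternative decomposition, same cost).

-- ===== PORT A =====

-- _bg: Counter over the rows, then most_common(1)[0][0] (first key of maximal count, in
-- first-occurrence order — PySem.List.max? returns the FIRST extremal element).
-- The `0` default is the empty-Counter case, where Python raises IndexError (excluded by Pre_).
def pvBg (g : List (List Int)) : Int :=
  let c : PySem.Dict Int Int :=
    g.foldl (fun d row => row.foldl (fun d x => d.modify x 0 (· + 1)) d) PySem.Dict.empty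
  match PySem.List.max? c.items (fun p => p.2) with
  | some p => p.1
  | none => 0

-- _find_sep_cols; pyGetD defaults are unreachable under Pre_ (all indices in range there).
def pvFindSepCols (g : List (List Int)) (bg : Int) : List (Int × Int) :=
  let h : Int := (g.length : Int)
  let w : Int := ((PySem.List.pyGetD g 0 []).length : Int)
  (PySem.List.pyRange 0 w 1).foldl (fun sep c =>
    let colColors : PySem.Set Int :=
      PySem.Set.ofList ((PySem.List.pyRange 0 h 1).map
        (fun r => PySem.List.pyGetD (PySem.List.pyGetD g r []) c 0))
    if colColors.length == 1 && (PySem.List.pyGetD (PySem.List.pyGetD g 0 []) c 0 != bg) then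
      sep ++ [(c, PySem.List.pyGetD (PySem.List.pyGetD g 0 []) c 0)]
    else sep) []

-- _extract_panels_v
def pvExtractPanelsV (g : List (List Int)) : List (List (List Int)) :=
  let bg := pvBg g
  let h : Int := (g.length : Int)
  let w : Int := ((PySem.List.pyGetD g 0 []).length : Int)
  let seps := pvFindSepCols g bg
  if seps = [] then [g] else
  let bounds : List Int := -1 :: (seps.map Prod.fst ++ [w])
  (PySem.List.pyRange 0 ((bounds.length : Int) - 1) 1).foldl (fun panels i =>
    let cs := PySem.List.pyGetD bounds i 0 + 1
    let ce := PySem.List.pyGetD bounds (i + 1) 0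
    if cs < ce then
      panels ++ [(PySem.List.pyRange 0 h 1).map (fun r =>
        (PySem.List.pyRange cs ce 1).map (fun c =>
          PySem.List.pyGetD (PySem.List.pyGetD g r []) c 0))]
    else panels) []

def panel_diff_v (g : List (List Int)) : List (List Int) :=
  let bg := pvBg g
  let panels := pvExtractPanelsV g
  if panels.length ≠ 2 then g else
  let p1 := PySem.List.pyGetD panels 0 []
  let p2 := PySem.List.pyGetD panels 1 []
  let h : Int := min (p1.length : Int) (p2.length : Int)
  let w : Int := min ((PySem.List.pyGetD p1 0 []).length : Int) ((PySem.List.pyGetD p2 0 []).length : Int)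
  let res0 : List (List Int) := (PySem.List.pyRange 0 h 1).map (fun _ => PySem.List.pyRepeat [bg] w)
  (PySem.List.pyRange 0 h 1).foldl (fun res r =>
    (PySem.List.pyRange 0 w 1).foldl (fun res c =>
      let v1 := PySem.List.pyGetD (PySem.List.pyGetD p1 r []) c 0
      let v2 := PySem.List.pyGetD (PySem.List.pyGetD p2 r []) c 0
      if v1 ≠ bg ∧ v2 = bg then
        PySem.List.pySetD res r (PySem.List.pySetD (PySem.List.pyGetD res r []) c v1)
      else if v2 ≠ bg ∧ v1 = bg then
        PySem.List.pySetD res r (PySem.List.pySetD (PySem.List.pyGetD res r []) c v2)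
      else res) res) res0

-- ===== PORT B =====
-- Source B: same _bg helper (ported once above as pvBg), then a single column walk that splits the
-- columns into column-major panels at uniform non-background separator columns.
def panel_diff_v_alt (g : List (List Int)) : List (List Int) :=
  let bg := pvBg g
  let h : Int := (g.length : Int)
  let w : Int := ((PySem.List.pyGetD g 0 []).length : Int)
  let st :=
    (PySem.List.pyRange 0 w 1).foldl
      (fun (st : List (List (List Int)) × List (List Int)) c =>
        let col := (PySem.List.pyRange 0 h 1).map
          (fun r => PySem.List.pyGetD (PySem.List.pyGetD g r []) c 0)
        if col.all (fun x => x == PySem.List.pyGetD col 0 0) &&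
            (PySem.List.pyGetD col 0 0 != bg) then
          (if st.2 ≠ [] then (st.1 ++ [st.2], []) else st)
        else (st.1, st.2 ++ [col])) ([], [])
  let panels := st.1 ++ (if st.2 ≠ [] then [st.2] else [])
  if panels.length ≠ 2 then g else
  let p := PySem.List.pyGetD panels 0 []
  let q := PySem.List.pyGetD panels 1 []
  let ww : Int := min (p.length : Int) (q.length : Int)
  (PySem.List.pyRange 0 h 1).map (fun r =>
    (PySem.List.pyRange 0 ww 1).map (fun c =>
      let a := PySem.List.pyGetD (PySem.List.pyGetD p c []) r 0
      let b := PySem.List.pyGetD (PySem.List.pyGetD q c []) r 0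
      if a ≠ bg ∧ b = bg then a
      else if b ≠ bg ∧ a = bg then b
      else bg))

-- ===== PRECONDITION & SPEC =====
-- Pre_ = exactly the inputs where Python A returns: some cell exists (else _bg hits an empty
-- Counter → IndexError) and no row is shorter than row 0 (else g[r][c] → IndexError).
def Pre_panel_diff_v (g : List (List Int)) : Prop :=
  g.flatten ≠ [] ∧ ∀ row ∈ g, (PySem.List.pyGetD g 0 []).length ≤ row.length
instance (g : List (List Int)) : Decidable (Pre_panel_diff_v g) := by
  unfold Pre_panel_diff_v; infer_instance
def pvWitness_panel_diff_v : List (List Int) := [[1, 1, 5, 2], [1, 2, 5, 2]]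

def Spec_panel_diff_v (g : List (List Int)) (out : List (List Int)) : Prop := out = panel_diff_v_alt g
instance (g : List (List Int)) (out : List (List Int)) : Decidable (Spec_panel_diff_v g out) := by unfold Spec_panel_diff_v; infer_instance

-- ===== CLAIM (what is proved, stated in full; the proofs are below) =====
def Claim_equal_panel_diff_v : Prop := ∀ (g : List (List Int)), Dom_panel_diff_v g → Pre_panel_diff_v g → Spec_panel_diff_v g (panel_diff_v g)

-- ===== LEMMAS AND PROOFS =====

-- Abbreviations for cell / column access and the two separator tests.
def pvGv (g : List (List Int)) (r c : Int) : Int :=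
  PySem.List.pyGetD (PySem.List.pyGetD g r []) c 0

def pvCol (g : List (List Int)) (c : Int) : List Int :=
  (PySem.List.pyRange 0 (g.length : Int) 1).map (fun r => pvGv g r c)

def pvSepB (g : List (List Int)) (bg c : Int) : Bool :=
  (pvCol g c).all (fun x => x == PySem.List.pyGetD (pvCol g c) 0 0) &&
    (PySem.List.pyGetD (pvCol g c) 0 0 != bg)

-- Segment machinery: runs of consecutive non-separator columns.
def pvSegStep (sep : Int → Bool) (st : List (List Int) × List Int) (c : Int) :
    List (List Int) × List Int :=
  if sep c then (if st.2 ≠ [] then (st.1 ++ [st.2], ([] : List Int)) else st)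
  else (st.1, st.2 ++ [c])

def pvClosedRuns (a : Int) : List Int → List (List Int)
  | [] => []
  | s :: ss => (if a + 1 < s then [PySem.List.pyRange (a + 1) s 1] else []) ++ pvClosedRuns s ss

def pvRunsFrom (a : Int) (ss : List Int) (w : Int) : List (List Int) :=
  pvClosedRuns a ss ++
    (if ss.getLastD a + 1 < w then [PySem.List.pyRange (ss.getLastD a + 1) w 1] else [])

theorem pvRunsFrom_nil (a w : Int) :
    pvRunsFrom a [] w = if a + 1 < w then [PySem.List.pyRange (a + 1) w 1] else [] := by
  simp [pvRunsFrom, pvClosedRuns]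

theorem pvRunsFrom_cons (a s : Int) (ss : List Int) (w : Int) :
    pvRunsFrom a (s :: ss) w =
      (if a + 1 < s then [PySem.List.pyRange (a + 1) s 1] else []) ++ pvRunsFrom s ss w := by
  simp [pvRunsFrom, pvClosedRuns, List.append_assoc, List.getLast?_cons]

theorem pvClosedRuns_append (a s : Int) (ss : List Int) :
    pvClosedRuns a (ss ++ [s]) =
      pvClosedRuns a ss ++
        (if ss.getLastD a + 1 < s then [PySem.List.pyRange (ss.getLastD a + 1) s 1] else []) := by
  induction ss generalizing a with
  | nil => simp [pvClosedRuns]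
  | cons x t ih =>
    simp only [List.cons_append, pvClosedRuns, ih x, List.getLastD_cons, List.append_assoc]

theorem pvPyRange_ne_nil_iff (a b : Int) : PySem.List.pyRange a b 1 ≠ [] ↔ a < b := by
  constructor
  · intro h
    by_contra hab
    exact h (PySem.List.pyRange_one_eq_nil (by omega))
  · intro h hnil
    have := PySem.List.length_pyRange_one a b
    rw [hnil] at this
    simp at this
    omega

-- The column walk's state after the first n columns: closed runs so far, and the open run
-- that starts right after the last separator seen.
theorem pvWalkInv (sep : Int → Bool) (n : Nat) :
    ((PySem.List.pyRange 0 (n : Int) 1).foldl (pvSegStep sep) ([], [])).1 =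
        pvClosedRuns (-1) (((PySem.List.pyRange 0 (n : Int) 1).filter sep)) ∧
      ((PySem.List.pyRange 0 (n : Int) 1).foldl (pvSegStep sep) ([], [])).2 =
        PySem.List.pyRange ((((PySem.List.pyRange 0 (n : Int) 1).filter sep).getLastD (-1)) + 1)
          (n : Int) 1 := by
  induction n with
  | zero =>
    constructor <;>
      simp [pvClosedRuns, PySem.List.pyRange_one_eq_nil (le_refl (0 : Int))]
  | succ n ih =>
    obtain ⟨ih1, ih2⟩ := ih
    have hsplit : PySem.List.pyRange 0 ((n + 1 : Nat) : Int) 1 =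
        PySem.List.pyRange 0 (n : Int) 1 ++ [(n : Int)] := by
      push_cast
      exact PySem.List.pyRange_one_succ_right (by omega)
    set F := (PySem.List.pyRange 0 (n : Int) 1).filter sep with hF
    set st := (PySem.List.pyRange 0 (n : Int) 1).foldl (pvSegStep sep) ([], []) with hst
    set L := F.getLastD (-1) with hLdef
    have hL : L < (n : Int) := by
      cases hf : F with
      | nil => rw [hLdef, hf]; simp; omega
      | cons a t =>
        have hm : L ∈ F := by
          rw [hLdef, hf]
          simp [List.getLastD_eq_getLast?, List.getLast?_eq_some_getLast (l := a :: t) (by simp),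
            List.getLast_mem]
        have : L ∈ PySem.List.pyRange 0 (n : Int) 1 := List.mem_of_mem_filter (hF ▸ hm)
        exact (PySem.List.mem_pyRange_one.mp this).2
    rw [hsplit, List.foldl_append, List.filter_append]
    cases hs : sep (n : Int) with
    | true =>
      have hfil : List.filter sep [(n : Int)] = [(n : Int)] := by simp [hs]
      have hne : st.2 ≠ [] ↔ L + 1 < (n : Int) := by
        rw [ih2]; exact pvPyRange_ne_nil_iff _ _
      have hstep : List.foldl (pvSegStep sep) st [(n : Int)] =
          (st.1 ++ (if L + 1 < (n : Int) then [st.2] else []), ([] : List Int)) := by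
        rw [List.foldl_cons, List.foldl_nil]
        unfold pvSegStep
        rw [hs, if_pos rfl]
        by_cases h2 : st.2 = []
        · have hnlt : ¬ (L + 1 < (n : Int)) := fun hlt => (hne.mpr hlt) h2
          rw [if_neg (by simpa using h2), if_neg hnlt, List.append_nil, ← h2]
        · rw [if_pos h2, if_pos (hne.mp h2)]
      refine ⟨?_, ?_⟩
      · rw [hstep, hfil, pvClosedRuns_append, ← ih1, ← hLdef, ← ih2]
      · rw [hstep, hfil]
        have hlast : (F ++ [(n : Int)]).getLastD (-1) = (n : Int) := by
          simp [List.getLastD_eq_getLast?]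
        rw [hlast, PySem.List.pyRange_one_eq_nil (by push_cast; omega)]
    | false =>
      have hfil : List.filter sep [(n : Int)] = [] := by simp [hs]
      have hstep : List.foldl (pvSegStep sep) st [(n : Int)] = (st.1, st.2 ++ [(n : Int)]) := by
        simp [pvSegStep, hs]
      refine ⟨?_, ?_⟩
      · rw [hstep, hfil, List.append_nil]; exact ih1
      · rw [hstep, hfil, List.append_nil, ih2, ← hLdef,
          show ((n + 1 : Nat) : Int) = (n : Int) + 1 by push_cast; ring]
        exact (PySem.List.pyRange_one_succ_right (by omega)).symm

-- B's panels are exactly the runs, as column lists.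
theorem pvWalkPanels (sep : Int → Bool) (n : Nat) :
    (((PySem.List.pyRange 0 (n : Int) 1).foldl (pvSegStep sep) ([], [])).1 ++
        (if ((PySem.List.pyRange 0 (n : Int) 1).foldl (pvSegStep sep) ([], [])).2 ≠ [] then
          [((PySem.List.pyRange 0 (n : Int) 1).foldl (pvSegStep sep) ([], [])).2] else [])) =
      pvRunsFrom (-1) ((PySem.List.pyRange 0 (n : Int) 1).filter sep) (n : Int) := by
  obtain ⟨h1, h2⟩ := pvWalkInv sep n
  rw [h1, h2, pvRunsFrom]
  by_cases hlt :
      ((PySem.List.pyRange 0 (n : Int) 1).filter sep).getLastD (-1) + 1 < (n : Int)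
  · rw [if_pos ((pvPyRange_ne_nil_iff _ _).mpr hlt), if_pos hlt]
  · rw [if_neg (fun hne => hlt ((pvPyRange_ne_nil_iff _ _).mp hne)), if_neg hlt]

-- B's step, written over pvCol/pvSepB (definitionally equal to the lambda in the port).
def pvStepB (g : List (List Int)) (bg : Int)
    (st : List (List (List Int)) × List (List Int)) (c : Int) :
    List (List (List Int)) × List (List Int) :=
  if pvSepB g bg c then (if st.2 ≠ [] then (st.1 ++ [st.2], []) else st)
  else (st.1, st.2 ++ [pvCol g c])

-- B's fold, whose state holds column lists, is the segment walk with every run mapped to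
-- its columns.
theorem pvWalkMapB (g : List (List Int)) (bg : Int) (l : List Int)
    (P : List (List Int)) (C : List Int) :
    l.foldl (pvStepB g bg) (P.map (List.map (pvCol g)), C.map (pvCol g)) =
    ((l.foldl (pvSegStep (pvSepB g bg)) (P, C)).1.map (List.map (pvCol g)),
     (l.foldl (pvSegStep (pvSepB g bg)) (P, C)).2.map (pvCol g)) := by
  induction l generalizing P C with
  | nil => rfl
  | cons c t ih =>
    rw [List.foldl_cons, List.foldl_cons]
    by_cases hs : pvSepB g bg c
    · by_cases hC : C = []
      · have h1 : pvStepB g bg (P.map (List.map (pvCol g)), C.map (pvCol g)) c =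
            (P.map (List.map (pvCol g)), C.map (pvCol g)) := by
          simp [pvStepB, hs, hC]
        have h2 : pvSegStep (pvSepB g bg) (P, C) c = (P, C) := by
          simp [pvSegStep, hs, hC]
        rw [h1, h2, ih P C]
      · have h1 : pvStepB g bg (P.map (List.map (pvCol g)), C.map (pvCol g)) c =
            ((P ++ [C]).map (List.map (pvCol g)), ([] : List Int).map (pvCol g)) := by
          simp [pvStepB, hs, hC]
        have h2 : pvSegStep (pvSepB g bg) (P, C) c = (P ++ [C], []) := by
          simp [pvSegStep, hs, hC]
        rw [h1, h2, ih (P ++ [C]) []]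
    · have h1 : pvStepB g bg (P.map (List.map (pvCol g)), C.map (pvCol g)) c =
          ((P).map (List.map (pvCol g)), (C ++ [c]).map (pvCol g)) := by
        simp [pvStepB, hs]
      have h2 : pvSegStep (pvSepB g bg) (P, C) c = (P, C ++ [c]) := by
        simp [pvSegStep, hs]
      rw [h1, h2, ih P (C ++ [c])]

-- set(col) has one element exactly when every entry equals the head.
theorem pvSetLenOne (x : Int) (xs : List Int) :
    (((PySem.Set.ofList (x :: xs)).length == 1) : Bool) =
      (x :: xs).all (fun y => y == x) := by
  by_cases hall : ∀ y ∈ x :: xs, y = x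
  · have hof : PySem.Set.ofList (x :: xs) = [x] := by
      rw [PySem.Set.ofList_eq_foldl, List.foldl_cons]
      have h0 : PySem.Set.add ([] : PySem.Set Int) x = [x] := by
        simp [PySem.Set.add, PySem.Set.contains]
      rw [h0]
      have : ∀ (l : List Int), (∀ y ∈ l, y = x) → l.foldl PySem.Set.add [x] = [x] := by
        intro l
        induction l with
        | nil => intro _; rfl
        | cons z t iht =>
          intro hz
          rw [List.foldl_cons, show z = x from hz z (by simp),
            show PySem.Set.add [x] x = [x] by simp [PySem.Set.add, PySem.Set.contains]]
          exact iht (fun y hy => hz y (by simp [hy]))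
      exact this xs (fun y hy => hall y (by simp [hy]))
    rw [hof]
    have hA : (x :: xs).all (fun y => y == x) = true := by
      rw [List.all_eq_true]
      intro y hy
      simpa using hall y hy
    rw [hA]
    rfl
  · have hall' := hall
    push Not at hall'
    obtain ⟨y, hy, hyx⟩ := hall'
    have hA : (x :: xs).all (fun y => y == x) = false := by
      rw [List.all_eq_false]
      exact ⟨y, hy, by simpa using hyx⟩
    have hL : ((PySem.Set.ofList (x :: xs)).length == 1) = false := by
      rw [beq_eq_false_iff_ne]
      intro h1
      obtain ⟨z, hz⟩ := List.length_eq_one_iff.mp h1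
      have hxz : x = z := by
        have := (PySem.Set.mem_ofList (x :: xs) x).mpr (by simp)
        rw [hz] at this
        simpa using this
      have hyz : y = z := by
        have := (PySem.Set.mem_ofList (x :: xs) y).mpr hy
        rw [hz] at this
        simpa using this
      exact hyx (hyz.trans hxz.symm)
    rw [hA, hL]

-- head of a column (g nonempty)
theorem pvColHead (g : List (List Int)) (hg : g ≠ []) (c : Int) :
    PySem.List.pyGetD (pvCol g c) 0 0 = pvGv g 0 c := by
  have hpos : (0 : Int) < (g.length : Int) := by
    cases g with
    | nil => exact absurd rfl hg
    | cons a t => exact_mod_cast Nat.succ_pos t.length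
  rw [pvCol, PySem.List.pyRange_one_cons hpos, List.map_cons,
    show ((0 : Int)) = ((0 : Nat) : Int) from rfl, PySem.List.pyGetD_natCast]
  rfl

-- A's separator test agrees with B's.
theorem pvSepEq (g : List (List Int)) (hg : g ≠ []) (bg c : Int) :
    (((PySem.Set.ofList ((PySem.List.pyRange 0 (g.length : Int) 1).map
          (fun r => PySem.List.pyGetD (PySem.List.pyGetD g r []) c 0))).length == 1) &&
        (PySem.List.pyGetD (PySem.List.pyGetD g 0 []) c 0 != bg)) = pvSepB g bg c := by
  have hpos : (0 : Int) < (g.length : Int) := by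
    cases g with
    | nil => exact absurd rfl hg
    | cons a t => exact_mod_cast Nat.succ_pos t.length
  show (((PySem.Set.ofList (pvCol g c)).length == 1) && (pvGv g 0 c != bg)) = pvSepB g bg c
  have hcons : pvCol g c =
      pvGv g 0 c :: (PySem.List.pyRange 1 (g.length : Int) 1).map (fun r => pvGv g r c) := by
    rw [pvCol, PySem.List.pyRange_one_cons hpos, List.map_cons]
    rfl
  rw [pvSepB, pvColHead g hg c, hcons, pvSetLenOne]

-- _find_sep_cols collects exactly the separator columns with their colours.
theorem pvFindSepCols_eq (g : List (List Int)) (bg : Int) (hg : g ≠ []) :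
    pvFindSepCols g bg =
      ((PySem.List.pyRange 0 ((PySem.List.pyGetD g 0 []).length : Int) 1).filter
          (pvSepB g bg)).map (fun c => (c, pvGv g 0 c)) := by
  have hrw : pvFindSepCols g bg =
      (PySem.List.pyRange 0 ((PySem.List.pyGetD g 0 []).length : Int) 1).foldl
        (fun sep c =>
          if (((PySem.Set.ofList ((PySem.List.pyRange 0 (g.length : Int) 1).map
                  (fun r => PySem.List.pyGetD (PySem.List.pyGetD g r []) c 0))).length == 1) &&
              (PySem.List.pyGetD (PySem.List.pyGetD g 0 []) c 0 != bg)) = true then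
            sep ++ [(c, PySem.List.pyGetD (PySem.List.pyGetD g 0 []) c 0)]
          else sep) [] := rfl
  rw [hrw, PySem.List.foldl_append_if _ _ _ [], List.nil_append,
    List.filter_congr (fun c _ => pvSepEq g hg bg c)]
  rfl

-- the bounds loop of _extract_panels_v, in Nat-indexed form, builds the runs
theorem pvBoundsFoldNat {β : Type} (build : List Int → β) (ss : List Int) :
    ∀ (a w : Int) (acc : List β),
      (List.range (ss.length + 1)).foldl
        (fun acc k =>
          if (a :: (ss ++ [w])).getD k 0 + 1 < (a :: (ss ++ [w])).getD (k + 1) 0 then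
            acc ++ [build (PySem.List.pyRange ((a :: (ss ++ [w])).getD k 0 + 1)
              ((a :: (ss ++ [w])).getD (k + 1) 0) 1)]
          else acc) acc
      = acc ++ (pvRunsFrom a ss w).map build := by
  induction ss with
  | nil =>
    intro a w acc
    show List.foldl _ acc (List.range 1) = _
    rw [List.range_one, List.foldl_cons, List.foldl_nil, pvRunsFrom_nil]
    show (if a + 1 < w then acc ++ [build (PySem.List.pyRange (a + 1) w 1)] else acc) = _
    split_ifs with h
    · simp
    · simp
  | cons s t ih =>
    intro a w acc
    rw [show (s :: t).length + 1 = (t.length + 1) + 1 from rfl, List.range_succ_eq_map,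
      List.foldl_cons, List.foldl_map]
    show List.foldl
        (fun acc k =>
          if (s :: (t ++ [w])).getD k 0 + 1 < (s :: (t ++ [w])).getD (k + 1) 0 then
            acc ++ [build (PySem.List.pyRange ((s :: (t ++ [w])).getD k 0 + 1)
              ((s :: (t ++ [w])).getD (k + 1) 0) 1)]
          else acc)
        (if a + 1 < s then acc ++ [build (PySem.List.pyRange (a + 1) s 1)] else acc)
        (List.range (t.length + 1)) = _
    rw [ih s w _, pvRunsFrom_cons, List.map_append, ← List.append_assoc]
    congr 1
    split_ifs with h
    · simp
    · simp

theorem pvBoundsFoldInt {β : Type} (build : List Int → β) (ss : List Int) (a w : Int)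
    (acc : List β) :
    (PySem.List.pyRange 0 ((ss.length + 1 : Nat) : Int) 1).foldl
      (fun acc i =>
        if PySem.List.pyGetD (a :: (ss ++ [w])) i 0 + 1 <
            PySem.List.pyGetD (a :: (ss ++ [w])) (i + 1) 0 then
          acc ++ [build (PySem.List.pyRange (PySem.List.pyGetD (a :: (ss ++ [w])) i 0 + 1)
            (PySem.List.pyGetD (a :: (ss ++ [w])) (i + 1) 0) 1)]
        else acc) acc
    = acc ++ (pvRunsFrom a ss w).map build := by
  rw [PySem.List.pyRange_zero_natCast, List.foldl_map]
  have hcast : (fun (acc : List β) (k : Nat) =>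
      (fun acc (i : Int) =>
        if PySem.List.pyGetD (a :: (ss ++ [w])) i 0 + 1 <
            PySem.List.pyGetD (a :: (ss ++ [w])) (i + 1) 0 then
          acc ++ [build (PySem.List.pyRange (PySem.List.pyGetD (a :: (ss ++ [w])) i 0 + 1)
            (PySem.List.pyGetD (a :: (ss ++ [w])) (i + 1) 0) 1)]
        else acc) acc ((k : Nat) : Int))
      = (fun acc k =>
          if (a :: (ss ++ [w])).getD k 0 + 1 < (a :: (ss ++ [w])).getD (k + 1) 0 then
            acc ++ [build (PySem.List.pyRange ((a :: (ss ++ [w])).getD k 0 + 1)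
              ((a :: (ss ++ [w])).getD (k + 1) 0) 1)]
          else acc) := by
    funext acc k
    show (if PySem.List.pyGetD (a :: (ss ++ [w])) (k : Int) 0 + 1 <
        PySem.List.pyGetD (a :: (ss ++ [w])) ((k : Int) + 1) 0 then _ else _) = _
    rw [show ((k : Int) + 1) = ((k + 1 : Nat) : Int) by push_cast; ring,
      PySem.List.pyGetD_natCast, PySem.List.pyGetD_natCast]
  rw [hcast]
  exact pvBoundsFoldNat build ss a w acc

def pvBuildA (g : List (List Int)) (run : List Int) : List (List Int) :=
  (PySem.List.pyRange 0 (g.length : Int) 1).map (fun r => run.map (fun c => pvGv g r c))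

-- _extract_panels_v builds exactly the row-major panels of the runs (when separators exist).
theorem pvExtract_eq (g : List (List Int)) (hg : g ≠ []) :
    pvExtractPanelsV g =
      if (PySem.List.pyRange 0 ((PySem.List.pyGetD g 0 []).length : Int) 1).filter
          (pvSepB g (pvBg g)) = [] then [g]
      else
        (pvRunsFrom (-1)
          ((PySem.List.pyRange 0 ((PySem.List.pyGetD g 0 []).length : Int) 1).filter
            (pvSepB g (pvBg g)))
          ((PySem.List.pyGetD g 0 []).length : Int)).map (pvBuildA g) := by
  have hrfl : pvExtractPanelsV g =
      (if pvFindSepCols g (pvBg g) = [] then [g] else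
        (PySem.List.pyRange 0
            ((((-1 : Int) :: ((pvFindSepCols g (pvBg g)).map Prod.fst ++
              [((PySem.List.pyGetD g 0 []).length : Int)])).length : Int) - 1) 1).foldl
          (fun panels i =>
            let bounds := (-1 : Int) :: ((pvFindSepCols g (pvBg g)).map Prod.fst ++
              [((PySem.List.pyGetD g 0 []).length : Int)])
            let cs := PySem.List.pyGetD bounds i 0 + 1
            let ce := PySem.List.pyGetD bounds (i + 1) 0
            if cs < ce then
              panels ++ [(PySem.List.pyRange 0 (g.length : Int) 1).map (fun r =>
                (PySem.List.pyRange cs ce 1).map (fun c =>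
                  PySem.List.pyGetD (PySem.List.pyGetD g r []) c 0))]
            else panels) []) := rfl
  rw [hrfl, pvFindSepCols_eq g (pvBg g) hg]
  by_cases hS : (PySem.List.pyRange 0 ((PySem.List.pyGetD g 0 []).length : Int) 1).filter
      (pvSepB g (pvBg g)) = []
  · rw [if_pos (by simp [hS]), if_pos hS]
  rw [if_neg (by simpa using hS), if_neg hS]
  simp only [List.map_map]
  have hid : ((PySem.List.pyRange 0 ((PySem.List.pyGetD g 0 []).length : Int) 1).filter
      (pvSepB g (pvBg g))).map (Prod.fst ∘ fun c => (c, pvGv g 0 c)) =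
      (PySem.List.pyRange 0 ((PySem.List.pyGetD g 0 []).length : Int) 1).filter
        (pvSepB g (pvBg g)) := by
    have hcomp : (Prod.fst ∘ fun c : Int => (c, pvGv g 0 c)) = id := rfl
    rw [hcomp, List.map_id]
  rw [hid]
  set S := (PySem.List.pyRange 0 ((PySem.List.pyGetD g 0 []).length : Int) 1).filter
    (pvSepB g (pvBg g)) with hSdef
  set w : Int := ((PySem.List.pyGetD g 0 []).length : Int) with hwdef
  have hlen : ((((-1 : Int) :: (S ++ [w])).length : Int) - 1) = ((S.length + 1 : Nat) : Int) := by
    simp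
  rw [hlen]
  exact pvBoundsFoldInt (pvBuildA g) S (-1) w []

-- setting position |A| in A ++ d :: t
theorem pvSetMid {α : Type} (A : List α) (d v : α) (t : List α) :
    (A ++ d :: t).set A.length v = A ++ v :: t := by
  induction A with
  | nil => rfl
  | cons a A ih => simp [ih]

-- the row loop over a fresh [bg]*m row fills it entry by entry
theorem pvRowFold (c1 c2 : Int → Prop) [DecidablePred c1] [DecidablePred c2]
    (f1 f2 : Int → Int) (d : Int) :
    ∀ (k m : Nat), k ≤ m →
      (PySem.List.pyRange 0 (k : Int) 1).foldl
        (fun row c => if c1 c then PySem.List.pySetD row c (f1 c)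
          else if c2 c then PySem.List.pySetD row c (f2 c) else row)
        (List.replicate m d)
      = (PySem.List.pyRange 0 (k : Int) 1).map
          (fun c => if c1 c then f1 c else if c2 c then f2 c else d)
        ++ List.replicate (m - k) d := by
  intro k
  induction k with
  | zero =>
    intro m _
    norm_num [PySem.List.pyRange_one_eq_nil (le_refl (0 : Int))]
  | succ k ih =>
    intro m hk
    have hsp : PySem.List.pyRange 0 ((k + 1 : Nat) : Int) 1 =
        PySem.List.pyRange 0 (k : Int) 1 ++ [(k : Int)] := by
      push_cast
      exact PySem.List.pyRange_one_succ_right (by omega)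
    set A := (PySem.List.pyRange 0 (k : Int) 1).map
      (fun c => if c1 c then f1 c else if c2 c then f2 c else d) with hA
    have hlenA : A.length = k := by
      rw [hA, List.length_map, PySem.List.length_pyRange_one]
      omega
    have hrep : List.replicate (m - k) d = d :: List.replicate (m - (k + 1)) d := by
      rw [show m - k = (m - (k + 1)) + 1 by omega, List.replicate_succ]
    have hmid : ∀ v, (A ++ d :: List.replicate (m - (k + 1)) d).set k v =
        A ++ v :: List.replicate (m - (k + 1)) d := by
      intro v
      have h := pvSetMid A d v (List.replicate (m - (k + 1)) d)
      rwa [hlenA] at h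
    rw [hsp, List.foldl_append, List.foldl_cons, List.foldl_nil, ih m (by omega),
      List.map_append, List.map_cons, List.map_nil, hrep]
    by_cases h1 : c1 (k : Int)
    · rw [if_pos h1, if_pos h1, PySem.List.pySetD_natCast, hmid]
      simp [← hA]
    · by_cases h2 : c2 (k : Int)
      · rw [if_neg h1, if_pos h2, if_neg h1, if_pos h2, PySem.List.pySetD_natCast, hmid]
        simp [← hA]
      · rw [if_neg h1, if_neg h2, if_neg h1, if_neg h2]
        simp [← hA]

-- the inner column loop only rewrites row r
theorem pvInnerToRow (c1 c2 : Int → Prop) [DecidablePred c1] [DecidablePred c2]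
    (f1 f2 : Int → Int) :
    ∀ (cs : List Int) (res : List (List Int)) (r : Nat), r < res.length →
      cs.foldl (fun res c =>
          if c1 c then PySem.List.pySetD res (r : Int)
            (PySem.List.pySetD (PySem.List.pyGetD res (r : Int) []) c (f1 c))
          else if c2 c then PySem.List.pySetD res (r : Int)
            (PySem.List.pySetD (PySem.List.pyGetD res (r : Int) []) c (f2 c))
          else res) res
      = PySem.List.pySetD res (r : Int)
          (cs.foldl (fun row c => if c1 c then PySem.List.pySetD row c (f1 c)
              else if c2 c then PySem.List.pySetD row c (f2 c) else row)
            (PySem.List.pyGetD res (r : Int) [])) := by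
  intro cs
  induction cs with
  | nil =>
    intro res r hr
    rw [List.foldl_nil, List.foldl_nil, PySem.List.pySetD_natCast, PySem.List.pyGetD_natCast,
      List.getD_eq_getElem _ _ hr, List.set_getElem_self hr]
  | cons c cs ih =>
    intro res r hr
    rw [List.foldl_cons, List.foldl_cons]
    have key : ∀ v : Int,
        cs.foldl (fun res c =>
            if c1 c then PySem.List.pySetD res (r : Int)
              (PySem.List.pySetD (PySem.List.pyGetD res (r : Int) []) c (f1 c))
            else if c2 c then PySem.List.pySetD res (r : Int)
              (PySem.List.pySetD (PySem.List.pyGetD res (r : Int) []) c (f2 c))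
            else res)
          (PySem.List.pySetD res (r : Int) (PySem.List.pySetD (PySem.List.pyGetD res (r : Int) []) c v))
        = PySem.List.pySetD res (r : Int)
            (cs.foldl (fun row c => if c1 c then PySem.List.pySetD row c (f1 c)
                else if c2 c then PySem.List.pySetD row c (f2 c) else row)
              (PySem.List.pySetD (PySem.List.pyGetD res (r : Int) []) c v)) := by
      intro v
      set res' := PySem.List.pySetD res (r : Int)
        (PySem.List.pySetD (PySem.List.pyGetD res (r : Int) []) c v) with hres'
      have hlen : res'.length = res.length := by
        rw [hres', PySem.List.pySetD_natCast, List.length_set]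
      have hget : PySem.List.pyGetD res' (r : Int) [] =
          PySem.List.pySetD (PySem.List.pyGetD res (r : Int) []) c v := by
        rw [hres', PySem.List.pySetD_natCast, PySem.List.pyGetD_natCast,
          List.getD_eq_getElem _ _ (by rw [List.length_set]; exact hr), List.getElem_set_self]
      have hset : ∀ row : List Int, PySem.List.pySetD res' (r : Int) row =
          PySem.List.pySetD res (r : Int) row := by
        intro row
        rw [hres', PySem.List.pySetD_natCast, PySem.List.pySetD_natCast,
          PySem.List.pySetD_natCast, List.set_set]
      rw [ih res' r (by omega), hget, hset]
    by_cases h1 : c1 c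
    · rw [if_pos h1, if_pos h1, key (f1 c)]
    · by_cases h2 : c2 c
      · rw [if_neg h1, if_pos h2, if_neg h1, if_pos h2, key (f2 c)]
      · rw [if_neg h1, if_neg h2, if_neg h1, if_neg h2, ih res r hr]

-- the outer loop rewrites each row once, from the initial matrix
theorem pvOuterFold (B : List (List Int) → Int → List (List Int)) (F : Int → List Int → List Int)
    (hB : ∀ (res : List (List Int)) (r : Nat), r < res.length →
      B res (r : Int) = PySem.List.pySetD res (r : Int)
        (F (r : Int) (PySem.List.pyGetD res (r : Int) []))) :
    ∀ (k n : Nat) (res : List (List Int)), k ≤ n → res.length = n →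
      (PySem.List.pyRange 0 (k : Int) 1).foldl B res
        = (List.range n).map
            (fun j => if j < k then F (j : Int) (res.getD j []) else res.getD j []) := by
  intro k
  induction k with
  | zero =>
    intro n res _ hn
    rw [PySem.List.pyRange_one_eq_nil (by norm_num), List.foldl_nil]
    apply List.ext_getElem (by simp [hn])
    intro j hj hj'
    rw [List.getElem_map, List.getElem_range, if_neg (by omega),
      List.getD_eq_getElem _ _ (by simpa using hj)]
  | succ k ih =>
    intro n res hk hn
    have hsp : PySem.List.pyRange 0 ((k + 1 : Nat) : Int) 1 =
        PySem.List.pyRange 0 (k : Int) 1 ++ [(k : Int)] := by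
      push_cast
      exact PySem.List.pyRange_one_succ_right (by omega)
    rw [hsp, List.foldl_append, List.foldl_cons, List.foldl_nil, ih n res (by omega) hn]
    set R := (List.range n).map
      (fun j => if j < k then F (j : Int) (res.getD j []) else res.getD j []) with hR
    have hlenR : R.length = n := by simp [hR]
    have hgetR : ∀ (j : Nat), j < n → R.getD j [] =
        if j < k then F (j : Int) (res.getD j []) else res.getD j [] := by
      intro j hj
      rw [hR, List.getD_eq_getElem _ _ (by simpa using hj), List.getElem_map]
      simp
    rw [hB R k (by rw [hlenR]; omega), PySem.List.pySetD_natCast, PySem.List.pyGetD_natCast,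
      hgetR k (by omega), if_neg (show ¬ (k < k) by omega)]
    apply List.ext_getElem (by simp [hlenR])
    intro j hj hj'
    rw [List.getElem_set]
    by_cases hjk : k = j
    · subst hjk
      rw [if_pos rfl]
      simp only [List.getElem_map, List.getElem_range]
      rw [if_pos (by omega)]
    · rw [if_neg hjk]
      have hiff : (j < k) = (j < k + 1) := by
        apply propext
        omega
      simp only [hR, List.getElem_map, List.getElem_range, hiff]

-- the two render tails, named (definitionally equal to the ports' tails)
def pvDiffRender (g : List (List Int)) (panels : List (List (List Int))) : List (List Int) :=
  let bg := pvBg g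
  let p1 := PySem.List.pyGetD panels 0 []
  let p2 := PySem.List.pyGetD panels 1 []
  let h : Int := min (p1.length : Int) (p2.length : Int)
  let w : Int := min ((PySem.List.pyGetD p1 0 []).length : Int) ((PySem.List.pyGetD p2 0 []).length : Int)
  let res0 : List (List Int) := (PySem.List.pyRange 0 h 1).map (fun _ => PySem.List.pyRepeat [bg] w)
  (PySem.List.pyRange 0 h 1).foldl (fun res r =>
    (PySem.List.pyRange 0 w 1).foldl (fun res c =>
      let v1 := PySem.List.pyGetD (PySem.List.pyGetD p1 r []) c 0
      let v2 := PySem.List.pyGetD (PySem.List.pyGetD p2 r []) c 0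
      if v1 ≠ bg ∧ v2 = bg then
        PySem.List.pySetD res r (PySem.List.pySetD (PySem.List.pyGetD res r []) c v1)
      else if v2 ≠ bg ∧ v1 = bg then
        PySem.List.pySetD res r (PySem.List.pySetD (PySem.List.pyGetD res r []) c v2)
      else res) res) res0

def pvAltRender (g : List (List Int)) (panels : List (List (List Int))) : List (List Int) :=
  let bg := pvBg g
  let p := PySem.List.pyGetD panels 0 []
  let q := PySem.List.pyGetD panels 1 []
  let ww : Int := min (p.length : Int) (q.length : Int)
  (PySem.List.pyRange 0 (g.length : Int) 1).map (fun r =>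
    (PySem.List.pyRange 0 ww 1).map (fun c =>
      let a := PySem.List.pyGetD (PySem.List.pyGetD p c []) r 0
      let b := PySem.List.pyGetD (PySem.List.pyGetD q c []) r 0
      if a ≠ bg ∧ b = bg then a
      else if b ≠ bg ∧ a = bg then b
      else bg))

theorem pvA_unfold (g : List (List Int)) :
    panel_diff_v g = if (pvExtractPanelsV g).length ≠ 2 then g
      else pvDiffRender g (pvExtractPanelsV g) := rfl

theorem pvB_unfold (g : List (List Int)) :
    panel_diff_v_alt g =
      (let st := (PySem.List.pyRange 0 ((PySem.List.pyGetD g 0 []).length : Int) 1).foldl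
        (pvStepB g (pvBg g)) ([], [])
       let panels := st.1 ++ (if st.2 ≠ [] then [st.2] else [])
       if panels.length ≠ 2 then g else pvAltRender g panels) := rfl

theorem pvGetMapRange {α : Type} (f : Int → α) (n j : Nat) (hj : j < n) (d : α) :
    PySem.List.pyGetD ((PySem.List.pyRange 0 (n : Int) 1).map f) (j : Int) d = f (j : Int) := by
  rw [PySem.List.pyGetD_natCast,
    List.getD_eq_getElem _ _ (by rw [List.length_map, PySem.List.length_pyRange_one]; omega),
    List.getElem_map, PySem.List.getElem_pyRange_one]
  norm_num

theorem pvGetMapList {α β : Type} (f : α → β) (l : List α) (k : Nat) (hk : k < l.length)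
    (d : β) :
    PySem.List.pyGetD (l.map f) (k : Int) d = f (l[k]'hk) := by
  rw [PySem.List.pyGetD_natCast, List.getD_eq_getElem _ _ (by simpa using hk),
    List.getElem_map]

-- with exactly two panels, A's mutation render equals B's comprehension render
theorem pvRenderEq (g : List (List Int)) (hg : g ≠ []) (u v : List Int) :
    pvDiffRender g [pvBuildA g u, pvBuildA g v] =
      pvAltRender g [u.map (pvCol g), v.map (pvCol g)] := by
  have hnpos : 0 < g.length := List.length_pos_iff.mpr hg
  simp only [pvDiffRender, pvAltRender]
  rw [show PySem.List.pyGetD [pvBuildA g u, pvBuildA g v] (0 : Int) [] = pvBuildA g u from rfl,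
    show PySem.List.pyGetD [pvBuildA g u, pvBuildA g v] (1 : Int) [] = pvBuildA g v from rfl,
    show PySem.List.pyGetD [u.map (pvCol g), v.map (pvCol g)] (0 : Int) [] = u.map (pvCol g) from rfl,
    show PySem.List.pyGetD [u.map (pvCol g), v.map (pvCol g)] (1 : Int) [] = v.map (pvCol g) from rfl]
  have hlenU : (pvBuildA g u).length = g.length := by
    simp [pvBuildA, PySem.List.length_pyRange_one]
  have hlenV : (pvBuildA g v).length = g.length := by
    simp [pvBuildA, PySem.List.length_pyRange_one]
  rw [show min ((pvBuildA g u).length : Int) ((pvBuildA g v).length : Int) = (g.length : Int) by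
    rw [hlenU, hlenV, min_self]]
  have hhu : PySem.List.pyGetD (pvBuildA g u) (0 : Int) [] = u.map (fun c => pvGv g 0 c) := by
    have h := pvGetMapRange (fun r => u.map (fun c => pvGv g r c)) g.length 0 hnpos []
    simpa [pvBuildA] using h
  have hhv : PySem.List.pyGetD (pvBuildA g v) (0 : Int) [] = v.map (fun c => pvGv g 0 c) := by
    have h := pvGetMapRange (fun r => v.map (fun c => pvGv g r c)) g.length 0 hnpos []
    simpa [pvBuildA] using h
  rw [show min (((PySem.List.pyGetD (pvBuildA g u) (0 : Int) [])).length : Int)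
      (((PySem.List.pyGetD (pvBuildA g v) (0 : Int) [])).length : Int)
      = ((min u.length v.length : Nat) : Int) by
    rw [hhu, hhv]
    simp [Nat.cast_min]]
  rw [show min ((u.map (pvCol g)).length : Int) ((v.map (pvCol g)).length : Int)
      = ((min u.length v.length : Nat) : Int) by
    simp [Nat.cast_min]]
  refine Eq.trans (pvOuterFold
    (fun res r =>
      (PySem.List.pyRange 0 ((min u.length v.length : Nat) : Int) 1).foldl (fun res c =>
        if PySem.List.pyGetD (PySem.List.pyGetD (pvBuildA g u) r []) c 0 ≠ pvBg g ∧
            PySem.List.pyGetD (PySem.List.pyGetD (pvBuildA g v) r []) c 0 = pvBg g then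
          PySem.List.pySetD res r (PySem.List.pySetD (PySem.List.pyGetD res r []) c
            (PySem.List.pyGetD (PySem.List.pyGetD (pvBuildA g u) r []) c 0))
        else if PySem.List.pyGetD (PySem.List.pyGetD (pvBuildA g v) r []) c 0 ≠ pvBg g ∧
            PySem.List.pyGetD (PySem.List.pyGetD (pvBuildA g u) r []) c 0 = pvBg g then
          PySem.List.pySetD res r (PySem.List.pySetD (PySem.List.pyGetD res r []) c
            (PySem.List.pyGetD (PySem.List.pyGetD (pvBuildA g v) r []) c 0))
        else res) res)
    (fun r row =>
      (PySem.List.pyRange 0 ((min u.length v.length : Nat) : Int) 1).foldl (fun row c =>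
        if PySem.List.pyGetD (PySem.List.pyGetD (pvBuildA g u) r []) c 0 ≠ pvBg g ∧
            PySem.List.pyGetD (PySem.List.pyGetD (pvBuildA g v) r []) c 0 = pvBg g then
          PySem.List.pySetD row c (PySem.List.pyGetD (PySem.List.pyGetD (pvBuildA g u) r []) c 0)
        else if PySem.List.pyGetD (PySem.List.pyGetD (pvBuildA g v) r []) c 0 ≠ pvBg g ∧
            PySem.List.pyGetD (PySem.List.pyGetD (pvBuildA g u) r []) c 0 = pvBg g then
          PySem.List.pySetD row c (PySem.List.pyGetD (PySem.List.pyGetD (pvBuildA g v) r []) c 0)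
        else row) row)
    (fun res r hr => pvInnerToRow
      (fun c => PySem.List.pyGetD (PySem.List.pyGetD (pvBuildA g u) (r : Int) []) c 0 ≠ pvBg g ∧
        PySem.List.pyGetD (PySem.List.pyGetD (pvBuildA g v) (r : Int) []) c 0 = pvBg g)
      (fun c => PySem.List.pyGetD (PySem.List.pyGetD (pvBuildA g v) (r : Int) []) c 0 ≠ pvBg g ∧
        PySem.List.pyGetD (PySem.List.pyGetD (pvBuildA g u) (r : Int) []) c 0 = pvBg g)
      (fun c => PySem.List.pyGetD (PySem.List.pyGetD (pvBuildA g u) (r : Int) []) c 0)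
      (fun c => PySem.List.pyGetD (PySem.List.pyGetD (pvBuildA g v) (r : Int) []) c 0)
      (PySem.List.pyRange 0 ((min u.length v.length : Nat) : Int) 1) res r hr)
    g.length g.length _ (le_refl g.length)
    (by rw [List.length_map, PySem.List.length_pyRange_one]; omega)) ?_
  rw [PySem.List.pyRange_zero_natCast g.length]
  simp only [List.map_map]
  apply List.map_congr_left
  intro j hj
  have hjlt : j < g.length := List.mem_range.mp hj
  rw [if_pos hjlt]
  have hres0get : ((List.range g.length).map
      ((fun _ => PySem.List.pyRepeat [pvBg g] ((min u.length v.length : Nat) : Int)) ∘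
        (fun k : Nat => (k : Int)))).getD j []
      = PySem.List.pyRepeat [pvBg g] ((min u.length v.length : Nat) : Int) := by
    rw [List.getD_eq_getElem _ _
      (by rw [List.length_map, List.length_range]; omega), List.getElem_map]
    rfl
  rw [hres0get, PySem.List.pyRepeat_singleton, Int.toNat_natCast]
  rw [pvRowFold _ _ _ _ _ (min u.length v.length) (min u.length v.length) (le_refl _)]
  rw [Nat.sub_self, List.replicate_zero, List.append_nil]
  have e1 : PySem.List.pyGetD (pvBuildA g u) (j : Int) [] = u.map (fun c => pvGv g (j : Int) c) := by
    simpa [pvBuildA] using pvGetMapRange (fun r => u.map (fun c => pvGv g r c)) g.length j hjlt []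
  have e2 : PySem.List.pyGetD (pvBuildA g v) (j : Int) [] = v.map (fun c => pvGv g (j : Int) c) := by
    simpa [pvBuildA] using pvGetMapRange (fun r => v.map (fun c => pvGv g r c)) g.length j hjlt []
  rw [e1, e2]
  show _ = (fun r =>
      (PySem.List.pyRange 0 ((min u.length v.length : Nat) : Int) 1).map (fun c =>
        if PySem.List.pyGetD (PySem.List.pyGetD (u.map (pvCol g)) c []) r 0 ≠ pvBg g ∧
            PySem.List.pyGetD (PySem.List.pyGetD (v.map (pvCol g)) c []) r 0 = pvBg g then
          PySem.List.pyGetD (PySem.List.pyGetD (u.map (pvCol g)) c []) r 0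
        else if PySem.List.pyGetD (PySem.List.pyGetD (v.map (pvCol g)) c []) r 0 ≠ pvBg g ∧
            PySem.List.pyGetD (PySem.List.pyGetD (u.map (pvCol g)) c []) r 0 = pvBg g then
          PySem.List.pyGetD (PySem.List.pyGetD (v.map (pvCol g)) c []) r 0
        else pvBg g)) ((j : Nat) : Int)
  apply List.map_congr_left
  intro c hc
  obtain ⟨h0c, hcM⟩ := PySem.List.mem_pyRange_one.mp hc
  have hck : c = ((c.toNat : Nat) : Int) := (Int.toNat_of_nonneg h0c).symm
  rw [hck] at hcM ⊢
  have hkM : c.toNat < min u.length v.length := by exact_mod_cast hcM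
  have hku : c.toNat < u.length := lt_of_lt_of_le hkM (min_le_left _ _)
  have hkv : c.toNat < v.length := lt_of_lt_of_le hkM (min_le_right _ _)
  rw [pvGetMapList (fun c => pvGv g (j : Int) c) u c.toNat hku 0,
    pvGetMapList (fun c => pvGv g (j : Int) c) v c.toNat hkv 0,
    pvGetMapList (pvCol g) u c.toNat hku [],
    pvGetMapList (pvCol g) v c.toNat hkv []]
  simp only [show ∀ x : Int, PySem.List.pyGetD (pvCol g x) (j : Int) 0 = pvGv g (j : Int) x from
    fun x => by simpa [pvCol] using pvGetMapRange (fun r => pvGv g r x) g.length j hjlt 0]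

-- ===== VERDICT (by name: the statement is the Claim_ definition above) =====
theorem panel_diff_v_spec : Claim_equal_panel_diff_v := by
  intro g _ hpre
  obtain ⟨hflat, hrows⟩ := hpre
  have hg : g ≠ [] := fun h => hflat (by rw [h]; rfl)
  show panel_diff_v g = panel_diff_v_alt g
  rw [pvA_unfold, pvExtract_eq g hg]
  simp only [pvB_unfold]
  set wN := (PySem.List.pyGetD g 0 []).length with hwN
  set S := (PySem.List.pyRange 0 (wN : Int) 1).filter (pvSepB g (pvBg g)) with hSdef
  have hwalk := pvWalkMapB g (pvBg g) (PySem.List.pyRange 0 (wN : Int) 1) [] []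
  simp only [List.map_nil] at hwalk
  have hwp := pvWalkPanels (pvSepB g (pvBg g)) wN
  rw [← hSdef] at hwp
  have hpB : ((PySem.List.pyRange 0 (wN : Int) 1).foldl (pvStepB g (pvBg g)) ([], [])).1 ++
      (if ((PySem.List.pyRange 0 (wN : Int) 1).foldl (pvStepB g (pvBg g)) ([], [])).2 ≠ [] then
        [((PySem.List.pyRange 0 (wN : Int) 1).foldl (pvStepB g (pvBg g)) ([], [])).2] else []) =
      (pvRunsFrom (-1) S (wN : Int)).map (List.map (pvCol g)) := by
    rw [hwalk]
    have hsplit :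
        ((PySem.List.pyRange 0 (wN : Int) 1).foldl
            (pvSegStep (pvSepB g (pvBg g))) ([], [])).1.map (List.map (pvCol g)) ++
          (if ((PySem.List.pyRange 0 (wN : Int) 1).foldl
              (pvSegStep (pvSepB g (pvBg g))) ([], [])).2.map (pvCol g) ≠ [] then
            [((PySem.List.pyRange 0 (wN : Int) 1).foldl
              (pvSegStep (pvSepB g (pvBg g))) ([], [])).2.map (pvCol g)] else []) =
        (((PySem.List.pyRange 0 (wN : Int) 1).foldl
            (pvSegStep (pvSepB g (pvBg g))) ([], [])).1 ++
          (if ((PySem.List.pyRange 0 (wN : Int) 1).foldl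
              (pvSegStep (pvSepB g (pvBg g))) ([], [])).2 ≠ [] then
            [((PySem.List.pyRange 0 (wN : Int) 1).foldl
              (pvSegStep (pvSepB g (pvBg g))) ([], [])).2] else [])).map
          (List.map (pvCol g)) := by
      by_cases hY : ((PySem.List.pyRange 0 (wN : Int) 1).foldl
          (pvSegStep (pvSepB g (pvBg g))) ([], [])).2 = [] <;> simp [hY]
    rw [hsplit, hwp]
  rw [hpB]
  by_cases hSnil : S = []
  · rw [if_pos hSnil, hSnil, if_pos (by simp), pvRunsFrom_nil]
    by_cases h0 : (-1 : Int) + 1 < (wN : Int)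
    · have h0' : 0 < wN := by exact_mod_cast (by omega : (0 : Int) < (wN : Int))
      simp [h0']
    · have h0' : ¬ 0 < wN := by
        intro hc
        exact h0 (by exact_mod_cast (by omega : (0 : Int) < (wN : Int) → (-1 : Int) + 1 < (wN : Int)) (by exact_mod_cast hc))
      simp [h0']
  · rw [if_neg hSnil]
    by_cases h2 : (pvRunsFrom (-1) S (wN : Int)).length = 2
    · obtain ⟨u, v, huv⟩ := List.length_eq_two.mp h2
      rw [huv]
      rw [if_neg (by simp), if_neg (by simp)]
      simp only [List.map_cons, List.map_nil]
      exact pvRenderEq g hg u v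
    · rw [if_pos (by simpa using h2), if_pos (by simpa using h2)]
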